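-- pv_equiv track=rewrite | github.com/JonathanDeLeon/merkle-tree | checkinclusion.py | validateInclusion
-- ===== SOURCE A (Python) =====
-- def validateInclusion(challenge, hashList, index=0):
--     if len(hashList) <= index: # check if node exists
--         return -1
--     proof = validateInclusion(challenge, hashList, 2*index + 1)
--     if proof >= 0:
--         return proof
--     proof = validateInclusion(challenge, hashList, 2*(index +1 ))
--     if proof >= 0:
--         return proof
--     return index if hashList[index] == challenge else -1
-- ===== SOURCE B (Python) =====
-- def validateInclusion(challenge, hashList, index=0):
--     n = len(hashList)
--     stack = [(index, False)]
--     while stack: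
--         i, expanded = stack.pop()
--         if not (0 <= i < n):
--             continue
--         if expanded:
--             if hashList[i] == challenge:
--                 return i
--         else:
--             stack.append((i, True))
--             stack.append((2 * i + 2, False))
--             stack.append((2 * i + 1, False))
--     return -1
-- ===== Notes on version B (the rewrite author's own statement) =====
-- stated objective: alternative
-- what changed: Replaced the recursive post-order search by an explicit-stack iterative post-order traversal of the implicit heap tree (push unexpanded node, then both children; compare on second visit), keeping first-match short-circuit; Pre_ excludes index < 0, where A hits RecursionError.
import Mathlib
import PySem

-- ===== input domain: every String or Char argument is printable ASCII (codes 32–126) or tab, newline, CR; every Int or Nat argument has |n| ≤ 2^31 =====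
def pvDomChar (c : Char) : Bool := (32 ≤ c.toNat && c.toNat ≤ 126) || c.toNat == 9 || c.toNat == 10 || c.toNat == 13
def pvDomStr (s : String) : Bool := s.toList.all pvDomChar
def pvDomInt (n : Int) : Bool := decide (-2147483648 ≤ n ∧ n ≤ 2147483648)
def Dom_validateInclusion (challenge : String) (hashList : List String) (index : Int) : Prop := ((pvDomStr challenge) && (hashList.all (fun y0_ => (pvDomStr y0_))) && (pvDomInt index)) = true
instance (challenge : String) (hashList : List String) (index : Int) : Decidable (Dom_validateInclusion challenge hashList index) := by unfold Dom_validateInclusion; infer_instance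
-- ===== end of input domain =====

-- B replaces A's recursive post-order search of the implicit heap tree by an
-- explicit-stack iterative post-order traversal (alternative decomposition, same cost).

-- ===== PORT A =====
-- termination lemmas cited by the port's decreasing_by (children indices 2i+1, 2(i+1) exceed i)
lemma pvDecA1 (len : Nat) (i : Int) (h0 : ¬ i < 0) (h1 : ¬ (len : Int) ≤ i) :
    (len + 1) - (2 * i + 1).toNat < (len + 1) - i.toNat := by omega
lemma pvDecA2 (len : Nat) (i : Int) (h0 : ¬ i < 0) (h1 : ¬ (len : Int) ≤ i) :
    (len + 1) - (2 * (i + 1)).toNat < (len + 1) - i.toNat := by omega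

-- Literal transliteration of A's recursion.  The `index < 0` branch is a totalizing
-- guard only: for index < 0 the Python A recurses without bound (RecursionError), so
-- those inputs are outside Pre_validateInclusion and this branch carries no claim.
def validateInclusion (challenge : String) (hashList : List String) (index : Int) : Int :=
  if index < 0 then -1
  else if (hashList.length : Int) ≤ index then -1
  else
    let proof := validateInclusion challenge hashList (2 * index + 1)
    if proof ≥ 0 then proof
    else
      let proof2 := validateInclusion challenge hashList (2 * (index + 1))
      if proof2 ≥ 0 then proof2
      else
        -- hashList[index]: here 0 ≤ index < len, so pyGet? is exact (always some)
        if PySem.List.pyGet? hashList index = some challenge then index else -1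
termination_by (hashList.length + 1) - index.toNat
decreasing_by
  · exact pvDecA1 hashList.length index ‹_› ‹_›
  · exact pvDecA2 hashList.length index ‹_› ‹_›

-- ===== PORT B =====
-- Termination measure for B's while-loop (not part of the computed value): the number
-- of loop iterations an unexpanded stack entry with index i can generate.
lemma pvDecP1 (n i : Int) (h : ¬ (i < 0 ∨ n ≤ i)) :
    (n.toNat + 1) - (2 * i + 1).toNat < (n.toNat + 1) - i.toNat := by omega
lemma pvDecP2 (n i : Int) (h : ¬ (i < 0 ∨ n ≤ i)) :
    (n.toNat + 1) - (2 * i + 2).toNat < (n.toNat + 1) - i.toNat := by omega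

def pvPot (n : Int) (i : Int) : Nat :=
  if i < 0 ∨ n ≤ i then 1 else pvPot n (2 * i + 1) + pvPot n (2 * i + 2) + 2
termination_by (n.toNat + 1) - i.toNat
decreasing_by
  · exact pvDecP1 n i ‹_›
  · exact pvDecP2 n i ‹_›

def pvWeight (n : Int) : Int × Bool → Nat
  | (_, true) => 1
  | (i, false) => pvPot n i

lemma pvPot_pos (n i : Int) : 1 ≤ pvPot n i := by
  rw [pvPot]; split <;> omega

lemma pvWeight_pos (n : Int) (e : Int × Bool) : 1 ≤ pvWeight n e := by
  rcases e with ⟨i, b⟩; cases b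
  · exact pvPot_pos n i
  · exact le_refl 1

-- termination lemmas cited by the loop's decreasing_by
lemma pvDecL1 (n : Int) (e : Int × Bool) (rest : List (Int × Bool)) :
    (rest.map (pvWeight n)).sum < ((e :: rest).map (pvWeight n)).sum := by
  have := pvWeight_pos n e
  simp only [List.map_cons, List.sum_cons]
  omega

lemma pvDecL3 (n i : Int) (rest : List (Int × Bool)) (h : 0 ≤ i ∧ i < n) :
    (((2 * i + 1, false) :: (2 * i + 2, false) :: (i, true) :: rest).map (pvWeight n)).sum
      < (((i, false) :: rest).map (pvWeight n)).sum := by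
  have hpot : pvPot n i = pvPot n (2 * i + 1) + pvPot n (2 * i + 2) + 2 := by
    rw [pvPot]; rw [if_neg]; omega
  simp only [List.map_cons, List.sum_cons, pvWeight]
  omega

-- the while-loop of B: pop an entry, skip it if out of range, on the second visit
-- compare and report, on the first visit push (i, True), right child, left child
def pvLoop (challenge : String) (hashList : List String) : List (Int × Bool) → Int
  | [] => -1
  | (i, expanded) :: rest =>
    if ¬ (0 ≤ i ∧ i < (hashList.length : Int)) then pvLoop challenge hashList rest
    else if expanded then
      -- hashList[i]: here 0 ≤ i < len, so pyGet? is exact (always some)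
      if PySem.List.pyGet? hashList i = some challenge then i
      else pvLoop challenge hashList rest
    else
      pvLoop challenge hashList ((2 * i + 1, false) :: (2 * i + 2, false) :: (i, true) :: rest)
termination_by stack => (stack.map (pvWeight hashList.length)).sum
decreasing_by
  · exact pvDecL1 hashList.length (i, expanded) rest
  · exact pvDecL1 hashList.length (i, expanded) rest
  · simp_all only [Bool.not_eq_true]
    exact pvDecL3 hashList.length i rest (not_not.mp ‹_›)

def validateInclusion_alt (challenge : String) (hashList : List String) (index : Int) : Int :=
  pvLoop challenge hashList [(index, false)]

-- ===== PRECONDITION & SPEC =====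
-- Pre_ excludes index < 0, on which the Python A recurses without bound and raises
-- RecursionError (it returns no value there); B returns -1 on those inputs.
def Pre_validateInclusion (challenge : String) (hashList : List String) (index : Int) : Prop := 0 ≤ index
instance (challenge : String) (hashList : List String) (index : Int) : Decidable (Pre_validateInclusion challenge hashList index) := by unfold Pre_validateInclusion; infer_instance
def pvWitness_validateInclusion : String × List String × Int := ("b", ["a", "b", "c"], 0)

def Spec_validateInclusion (challenge : String) (hashList : List String) (index : Int) (out : Int) : Prop := out = validateInclusion_alt challenge hashList index
instance (challenge : String) (hashList : List String) (index : Int) (out : Int) : Decidable (Spec_validateInclusion challenge hashList index out) := by unfold Spec_validateInclusion; infer_instance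

-- ===== CLAIM (what is proved, stated in full; the proofs are below) =====
def Claim_equal_validateInclusion : Prop := ∀ (challenge : String) (hashList : List String) (index : Int), Dom_validateInclusion challenge hashList index → Pre_validateInclusion challenge hashList index → Spec_validateInclusion challenge hashList index (validateInclusion challenge hashList index)

-- ===== LEMMAS AND PROOFS =====

lemma valA_neg (c : String) (hs : List String) (i : Int) (h : i < 0) :
    validateInclusion c hs i = -1 := by
  rw [validateInclusion]; simp [h]

lemma valA_oob (c : String) (hs : List String) (i : Int) (h : (hs.length : Int) ≤ i) :
    validateInclusion c hs i = -1 := by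
  rw [validateInclusion]; simp [h]

lemma valA_in (c : String) (hs : List String) (i : Int)
    (h0 : ¬ i < 0) (h1 : ¬ (hs.length : Int) ≤ i) :
    validateInclusion c hs i =
      (if validateInclusion c hs (2 * i + 1) ≥ 0 then validateInclusion c hs (2 * i + 1)
       else if validateInclusion c hs (2 * (i + 1)) ≥ 0 then validateInclusion c hs (2 * (i + 1))
       else if PySem.List.pyGet? hs i = some c then i else -1) := by
  rw [validateInclusion, if_neg h0, if_neg h1]

lemma pvLoop_nil (c : String) (hs : List String) : pvLoop c hs [] = -1 := by
  simp [pvLoop]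

lemma pvLoop_cons (c : String) (hs : List String) (i : Int) (e : Bool) (rest : List (Int × Bool)) :
    pvLoop c hs ((i, e) :: rest) =
      if ¬ (0 ≤ i ∧ i < (hs.length : Int)) then pvLoop c hs rest
      else if e then
        (if PySem.List.pyGet? hs i = some c then i else pvLoop c hs rest)
      else
        pvLoop c hs ((2 * i + 1, false) :: (2 * i + 2, false) :: (i, true) :: rest) := by
  rw [pvLoop]

lemma valA_lb_aux (c : String) (hs : List String) :
    ∀ (k : Nat) (i : Int), hs.length + 1 - i.toNat ≤ k → -1 ≤ validateInclusion c hs i := by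
  intro k
  induction k with
  | zero =>
    intro i hk
    rw [valA_oob c hs i (by omega)]
  | succ k ih =>
    intro i hk
    by_cases h0 : i < 0
    · rw [valA_neg c hs i h0]
    by_cases h1 : (hs.length : Int) ≤ i
    · rw [valA_oob c hs i h1]
    rw [valA_in c hs i h0 h1]
    have ih1 := ih (2 * i + 1) (by omega)
    have ih2 := ih (2 * (i + 1)) (by omega)
    split_ifs <;> omega

lemma valA_lb (c : String) (hs : List String) (i : Int) : -1 ≤ validateInclusion c hs i :=
  valA_lb_aux c hs (hs.length + 1) i (by omega)

-- the loop invariant: popping an unexpanded node i computes A's recursive search below i,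
-- and on failure continues with the rest of the stack
lemma loop_false_aux (c : String) (hs : List String) :
    ∀ (k : Nat) (i : Int) (rest : List (Int × Bool)), hs.length + 1 - i.toNat ≤ k →
      pvLoop c hs ((i, false) :: rest)
        = if 0 ≤ validateInclusion c hs i then validateInclusion c hs i
          else pvLoop c hs rest := by
  intro k
  induction k with
  | zero =>
    intro i rest hk
    rw [valA_oob c hs i (by omega), pvLoop_cons, if_pos (by omega)]
    norm_num
  | succ k ih =>
    intro i rest hk
    by_cases h0 : i < 0
    · rw [valA_neg c hs i h0, pvLoop_cons, if_pos (by omega)]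
      norm_num
    by_cases h1 : (hs.length : Int) ≤ i
    · rw [valA_oob c hs i h1, pvLoop_cons, if_pos (by omega)]
      norm_num
    have h22 : 2 * (i + 1) = 2 * i + 2 := by ring
    rw [pvLoop_cons, if_neg (by omega), if_neg (by simp)]
    rw [ih (2 * i + 1) _ (by omega)]
    rw [valA_in c hs i h0 h1, h22]
    by_cases hp : 0 ≤ validateInclusion c hs (2 * i + 1)
    · rw [if_pos hp, if_pos (by omega : validateInclusion c hs (2 * i + 1) ≥ 0),
          if_pos hp]
    rw [if_neg hp, if_neg (by omega : ¬ validateInclusion c hs (2 * i + 1) ≥ 0)]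
    rw [ih (2 * i + 2) _ (by omega)]
    by_cases hp2 : 0 ≤ validateInclusion c hs (2 * i + 2)
    · rw [if_pos hp2, if_pos (by omega : validateInclusion c hs (2 * i + 2) ≥ 0),
          if_pos hp2]
    rw [if_neg hp2, if_neg (by omega : ¬ validateInclusion c hs (2 * i + 2) ≥ 0)]
    rw [pvLoop_cons, if_neg (by omega), if_pos rfl]
    by_cases hm : PySem.List.pyGet? hs i = some c
    · rw [if_pos hm, if_pos hm, if_pos (by omega : (0:Int) ≤ i)]
    · rw [if_neg hm, if_neg hm, if_neg (by omega : ¬ (0:Int) ≤ (-1:Int))]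

lemma loop_false (c : String) (hs : List String) (i : Int) (rest : List (Int × Bool)) :
    pvLoop c hs ((i, false) :: rest)
      = if 0 ≤ validateInclusion c hs i then validateInclusion c hs i
        else pvLoop c hs rest :=
  loop_false_aux c hs (hs.length + 1) i rest (by omega)

-- ===== VERDICT (by name: the statement is the Claim_ definition above) =====
theorem validateInclusion_spec : Claim_equal_validateInclusion := by
  intro challenge hashList index _ _
  unfold Spec_validateInclusion validateInclusion_alt
  rw [loop_false]
  by_cases h : 0 ≤ validateInclusion challenge hashList index
  · rw [if_pos h]
  · have := valA_lb challenge hashList index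
    have hv : validateInclusion challenge hashList index = -1 := by omega
    rw [if_neg h, pvLoop_nil, hv]
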